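-- pv_equiv track=rewrite | github.com/doputer/algorithm | 프로그래머스/level1/옹알이 (2).py | solution
-- ===== SOURCE A (Python) =====
-- def solution(babbling):
--   words = ["aya", "ye", "woo", "ma"]
--   count = 0
--
--   for word in babbling:
--     last = ''
--
--     while word[:2] in words or word[:3] in words:
--       if word[:2] in words:
--         if last == word[:2]:
--           break
--
--         last = word[:2]
--         word = word[2:]
--       else:
--         if last == word[:3]:
--           break
--
--         last = word[:3]
--         word = word[3:]
--
--     if len(word) == 0:
--       count += 1
--
--   return count
-- ===== SOURCE B (Python) =====
-- # Dispatch on the first character: the four syllables start with distinct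
-- # letters, so at each position at most one syllable can match.
-- _SYL = {'a': 'aya', 'y': 'ye', 'w': 'woo', 'm': 'ma'}
--
--
-- def _valid(s, last):
--     if not s:
--         return True
--     syl = _SYL.get(s[0])
--     if syl is None or syl == last or not s.startswith(syl):
--         return False
--     return _valid(s[len(syl):], syl)
--
--
-- def solution(babbling):
--     return sum(_valid(w, '') for w in babbling)
-- ===== Notes on version B (the rewrite author's own statement) =====
-- stated objective: idiomatic
-- what changed: Replaces A's in-place while-loop that repeatedly slices word[:2]/word[:3] and tests each against a word list (then checks emptiness at the end) with a recursive validator that dispatches on the first character through a dict — the four syllables start with distinct letters, so at most one candidate is ever compared per step — counted with sum over a generator.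
import Mathlib
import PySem

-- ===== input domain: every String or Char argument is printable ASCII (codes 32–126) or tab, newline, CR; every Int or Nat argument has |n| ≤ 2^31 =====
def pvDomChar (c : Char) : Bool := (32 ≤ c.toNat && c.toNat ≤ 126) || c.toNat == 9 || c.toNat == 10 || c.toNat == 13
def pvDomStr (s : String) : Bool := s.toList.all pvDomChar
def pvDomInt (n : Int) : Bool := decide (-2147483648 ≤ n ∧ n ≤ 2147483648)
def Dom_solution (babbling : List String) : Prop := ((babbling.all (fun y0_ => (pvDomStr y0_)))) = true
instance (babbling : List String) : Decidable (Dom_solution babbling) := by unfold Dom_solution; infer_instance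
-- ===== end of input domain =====

-- B replaces A's in-place while-loop over word[:2]/word[:3] membership tests with a
-- recursive validator dispatching on the first character (idiomatic; same asymptotic cost).

-- ===== PORT A =====
def pvWordsA : List (List Char) := [['a','y','a'], ['y','e'], ['w','o','o'], ['m','a']]

-- termination helpers for the while-loop port (cited in decreasing_by)
theorem pvLen2 {w : List Char} (h : List.take 2 w ∈ pvWordsA) : 2 ≤ w.length := by
  simp only [pvWordsA, List.mem_cons, List.not_mem_nil, or_false] at h
  rcases h with h|h|h|h <;> (have := congrArg List.length h; simp at this; omega)

theorem pvLen3 {w : List Char} (h3 : List.take 3 w ∈ pvWordsA)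
    (h2 : List.take 2 w ∉ pvWordsA) : 3 ≤ w.length := by
  by_contra hl
  push Not at hl
  have hw : List.take 3 w = w := List.take_of_length_le (by omega)
  have h2' : List.take 2 w = w := List.take_of_length_le (by omega)
  rw [hw] at h3
  exact h2 (by rw [h2']; exact h3)

def pvLoopA (word last : List Char) : List Char :=
  if _h : PySem.List.slice word none (some 2) ∈ pvWordsA ∨
      PySem.List.slice word none (some 3) ∈ pvWordsA then
    if h2 : PySem.List.slice word none (some 2) ∈ pvWordsA then
      if last = PySem.List.slice word none (some 2) then word
      else pvLoopA (PySem.List.slice word (some 2) none) (PySem.List.slice word none (some 2))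
    else
      if last = PySem.List.slice word none (some 3) then word
      else pvLoopA (PySem.List.slice word (some 3) none) (PySem.List.slice word none (some 3))
  else word
termination_by word.length
decreasing_by
  · rw [PySem.List.slice_from word (by norm_num)]
    rw [PySem.List.slice_to word (by norm_num)] at h2
    have := pvLen2 (by simpa using h2)
    simp; omega
  · rw [PySem.List.slice_from word (by norm_num)]
    rw [PySem.List.slice_to word (by norm_num)] at h2 _h
    rcases _h with h | h3
    · exact absurd (by simpa using h) (by simpa using h2)
    · rw [PySem.List.slice_to word (by norm_num)] at h3
      have := pvLen3 (by simpa using h3) (by simpa using h2)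
      simp; omega

def solution (babbling : List String) : Int :=
  babbling.foldl
    (fun count w =>
      if (pvLoopA w.toList []).length = 0 then count + 1 else count) 0

-- ===== PORT B =====
def pvSylB : PySem.Dict Char (List Char) :=
  PySem.Dict.ofList [('a', ['a','y','a']), ('y', ['y','e']), ('w', ['w','o','o']), ('m', ['m','a'])]

-- termination helper: characterisation of the dispatch dict (cited in decreasing_by)
theorem pvSylB_get (c : Char) : PySem.Dict.get? pvSylB c =
    if c = 'a' then some ['a','y','a'] else if c = 'y' then some ['y','e']
    else if c = 'w' then some ['w','o','o'] else if c = 'm' then some ['m','a'] else none := by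
  have hi : pvSylB.items = [('a', ['a','y','a']), ('y', ['y','e']), ('w', ['w','o','o']), ('m', ['m','a'])] := by decide
  split_ifs with h1 h2 h3 h4 <;> subst_vars <;> first
    | decide
    | (simp [PySem.Dict.get?, hi]
       exact ⟨fun e => h1 e.symm, fun e => h2 e.symm, fun e => h3 e.symm, fun e => h4 e.symm⟩)

def pvValid : List Char → List Char → Bool
  | [], _ => true
  | c :: rest, last =>
    match hg : PySem.Dict.get? pvSylB c with
    | none => false
    | some syl =>
      if _hp : syl = last ∨ PySem.Chars.startswith (c :: rest) syl = false then false
      else pvValid ((c :: rest).drop syl.length) syl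
termination_by s _ => s.length
decreasing_by
  have hlen : 0 < syl.length := by
    rw [pvSylB_get] at hg
    split_ifs at hg <;> first | (cases hg; decide) | simp at hg
  have hpre : syl <+: (c :: rest) := by
    rw [← PySem.Chars.startswith_iff]
    cases hb : PySem.Chars.startswith (c :: rest) syl
    · exact absurd (Or.inr hb) _hp
    · rfl
  have := hpre.length_le
  simp at this ⊢; omega

def solution_alt (babbling : List String) : Int :=
  (babbling.map (fun w => if pvValid w.toList [] then (1 : Int) else 0)).sum

-- ===== PRECONDITION & SPEC =====
def Spec_solution (babbling : List String) (out : Int) : Prop := out = solution_alt babbling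
instance (babbling : List String) (out : Int) : Decidable (Spec_solution babbling out) := by unfold Spec_solution; infer_instance

-- ===== CLAIM (what is proved, stated in full; the proofs are below) =====
def Claim_equal_solution : Prop := ∀ (babbling : List String), Dom_solution babbling → Spec_solution babbling (solution babbling)

-- ===== LEMMAS AND PROOFS =====
theorem pvLoopA_unfold (w last : List Char) : pvLoopA w last =
    if List.take 2 w ∈ pvWordsA ∨ List.take 3 w ∈ pvWordsA then
      if List.take 2 w ∈ pvWordsA then
        if last = List.take 2 w then w else pvLoopA (List.drop 2 w) (List.take 2 w)
      else
        if last = List.take 3 w then w else pvLoopA (List.drop 3 w) (List.take 3 w)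
    else w := by
  rw [pvLoopA]
  rw [PySem.List.slice_to w (by norm_num : (0:Int) ≤ 2), PySem.List.slice_to w (by norm_num : (0:Int) ≤ 3),
      PySem.List.slice_from w (by norm_num : (0:Int) ≤ 2), PySem.List.slice_from w (by norm_num : (0:Int) ≤ 3)]
  simp only [show Int.toNat 2 = 2 from rfl, show Int.toNat 3 = 3 from rfl, dite_eq_ite]

theorem pvValid_cons (c : Char) (rest last : List Char) : pvValid (c :: rest) last =
    match PySem.Dict.get? pvSylB c with
    | none => false
    | some syl =>
      if syl = last ∨ PySem.Chars.startswith (c :: rest) syl = false then false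
      else pvValid ((c :: rest).drop syl.length) syl := by
  rw [pvValid]
  cases hq : PySem.Dict.get? pvSylB c <;> simp

theorem pvMem2 (w : List Char) :
    List.take 2 w ∈ pvWordsA ↔ (['y','e'] <+: w ∨ ['m','a'] <+: w) := by
  constructor
  · intro h
    simp only [pvWordsA, List.mem_cons, List.not_mem_nil, or_false] at h
    rcases h with h|h|h|h
    · exact absurd (congrArg List.length h) (by simp; omega)
    · left; rw [List.prefix_iff_eq_take]; simpa using h.symm
    · exact absurd (congrArg List.length h) (by simp; omega)
    · right; rw [List.prefix_iff_eq_take]; simpa using h.symm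
  · rintro (h|h) <;> (rw [List.prefix_iff_eq_take] at h; simp at h; simp [pvWordsA, ← h])

theorem pvMem3 (w : List Char) (h2 : List.take 2 w ∉ pvWordsA) :
    List.take 3 w ∈ pvWordsA ↔ (['a','y','a'] <+: w ∨ ['w','o','o'] <+: w) := by
  constructor
  · intro h
    simp only [pvWordsA, List.mem_cons, List.not_mem_nil, or_false] at h
    rcases h with h|h|h|h
    · left; rw [List.prefix_iff_eq_take]; simpa using h.symm
    · exfalso
      have ht : List.take 2 w = ['y','e'] := by
        have e := List.take_take (i:=2) (j:=3) (l:=w)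
        norm_num at e
        rw [← e, h]; decide
      exact h2 (by simp [pvWordsA, ht])
    · right; rw [List.prefix_iff_eq_take]; simpa using h.symm
    · exfalso
      have ht : List.take 2 w = ['m','a'] := by
        have e := List.take_take (i:=2) (j:=3) (l:=w)
        norm_num at e
        rw [← e, h]; decide
      exact h2 (by simp [pvWordsA, ht])
  · rintro (h|h) <;> (rw [List.prefix_iff_eq_take] at h; simp at h; simp [pvWordsA, ← h])

theorem pvKey : ∀ (n : Nat) (s last : List Char), s.length ≤ n →
    (pvLoopA s last = [] ↔ pvValid s last = true) := by
  intro n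
  induction n with
  | zero =>
    intro s last hlen
    have hs : s = [] := by cases s <;> simp_all
    subst hs
    rw [pvLoopA_unfold]
    simp [pvValid, pvWordsA]
  | succ n ih =>
    intro s last hlen
    match s with
    | [] => rw [pvLoopA_unfold]; simp [pvValid, pvWordsA]
    | c :: rest =>
      rw [pvLoopA_unfold, pvValid_cons]
      by_cases hca : c = 'a'
      · subst hca
        rw [show PySem.Dict.get? pvSylB 'a' = some ['a','y','a'] from by decide]
        change _ ↔ (if ['a','y','a'] = last ∨ PySem.Chars.startswith ('a'::rest) ['a','y','a'] = false then false else pvValid (List.drop 3 ('a'::rest)) ['a','y','a']) = true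
        have m2 : List.take 2 ('a'::rest) ∉ pvWordsA := by
          rw [pvMem2]; rintro (h|h) <;> simp [List.cons_prefix_iff] at h
        by_cases hp : ['a','y','a'] <+: ('a'::rest)
        · have m3 : List.take 3 ('a'::rest) ∈ pvWordsA := (pvMem3 _ m2).mpr (Or.inl hp)
          have ht : List.take 3 ('a'::rest) = ['a','y','a'] := by
            rw [List.prefix_iff_eq_take] at hp; simpa using hp.symm
          have hsw : PySem.Chars.startswith ('a'::rest) ['a','y','a'] = true :=
            (PySem.Chars.startswith_iff _ _).mpr hp
          rw [if_pos (Or.inr m3), if_neg m2, ht]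
          by_cases hl : last = ['a','y','a']
          · rw [if_pos hl, if_pos (Or.inl hl.symm)]; simp
          · rw [if_neg hl, if_neg (by rw [hsw]; simp; exact fun e => hl e.symm)]
            exact ih _ ['a','y','a'] (by simp at hlen ⊢; omega)
        · have m3 : List.take 3 ('a'::rest) ∉ pvWordsA := by
            rw [pvMem3 _ m2]; rintro (h|h)
            · exact hp h
            · simp [List.cons_prefix_iff] at h
          have hsw : PySem.Chars.startswith ('a'::rest) ['a','y','a'] = false := by
            cases hb : PySem.Chars.startswith ('a'::rest) ['a','y','a']
            · rfl
            · exact absurd ((PySem.Chars.startswith_iff _ _).mp hb) hp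
          rw [if_neg (by rintro (h|h) <;> [exact m2 h; exact m3 h]), if_pos (Or.inr hsw)]
          simp
      · by_cases hcy : c = 'y'
        · subst hcy
          rw [show PySem.Dict.get? pvSylB 'y' = some ['y','e'] from by decide]
          change _ ↔ (if ['y','e'] = last ∨ PySem.Chars.startswith ('y'::rest) ['y','e'] = false then false else pvValid (List.drop 2 ('y'::rest)) ['y','e']) = true
          by_cases hp : ['y','e'] <+: ('y'::rest)
          · have m2 : List.take 2 ('y'::rest) ∈ pvWordsA := (pvMem2 _).mpr (Or.inl hp)
            have ht : List.take 2 ('y'::rest) = ['y','e'] := by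
              rw [List.prefix_iff_eq_take] at hp; simpa using hp.symm
            have hsw : PySem.Chars.startswith ('y'::rest) ['y','e'] = true :=
              (PySem.Chars.startswith_iff _ _).mpr hp
            rw [if_pos (Or.inl m2), if_pos m2, ht]
            by_cases hl : last = ['y','e']
            · rw [if_pos hl, if_pos (Or.inl hl.symm)]; simp
            · rw [if_neg hl, if_neg (by rw [hsw]; simp; exact fun e => hl e.symm)]
              exact ih _ ['y','e'] (by simp at hlen ⊢; omega)
          · have m2 : List.take 2 ('y'::rest) ∉ pvWordsA := by
              rw [pvMem2]; rintro (h|h)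
              · exact hp h
              · simp [List.cons_prefix_iff] at h
            have m3 : List.take 3 ('y'::rest) ∉ pvWordsA := by
              rw [pvMem3 _ m2]; rintro (h|h) <;> simp [List.cons_prefix_iff] at h
            have hsw : PySem.Chars.startswith ('y'::rest) ['y','e'] = false := by
              cases hb : PySem.Chars.startswith ('y'::rest) ['y','e']
              · rfl
              · exact absurd ((PySem.Chars.startswith_iff _ _).mp hb) hp
            rw [if_neg (by rintro (h|h) <;> [exact m2 h; exact m3 h]), if_pos (Or.inr hsw)]
            simp
        · by_cases hcw : c = 'w'
          · subst hcw
            rw [show PySem.Dict.get? pvSylB 'w' = some ['w','o','o'] from by decide]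
            change _ ↔ (if ['w','o','o'] = last ∨ PySem.Chars.startswith ('w'::rest) ['w','o','o'] = false then false else pvValid (List.drop 3 ('w'::rest)) ['w','o','o']) = true
            have m2 : List.take 2 ('w'::rest) ∉ pvWordsA := by
              rw [pvMem2]; rintro (h|h) <;> simp [List.cons_prefix_iff] at h
            by_cases hp : ['w','o','o'] <+: ('w'::rest)
            · have m3 : List.take 3 ('w'::rest) ∈ pvWordsA := (pvMem3 _ m2).mpr (Or.inr hp)
              have ht : List.take 3 ('w'::rest) = ['w','o','o'] := by
                rw [List.prefix_iff_eq_take] at hp; simpa using hp.symm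
              have hsw : PySem.Chars.startswith ('w'::rest) ['w','o','o'] = true :=
                (PySem.Chars.startswith_iff _ _).mpr hp
              rw [if_pos (Or.inr m3), if_neg m2, ht]
              by_cases hl : last = ['w','o','o']
              · rw [if_pos hl, if_pos (Or.inl hl.symm)]; simp
              · rw [if_neg hl, if_neg (by rw [hsw]; simp; exact fun e => hl e.symm)]
                exact ih _ ['w','o','o'] (by simp at hlen ⊢; omega)
            · have m3 : List.take 3 ('w'::rest) ∉ pvWordsA := by
                rw [pvMem3 _ m2]; rintro (h|h)
                · simp [List.cons_prefix_iff] at h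
                · exact hp h
              have hsw : PySem.Chars.startswith ('w'::rest) ['w','o','o'] = false := by
                cases hb : PySem.Chars.startswith ('w'::rest) ['w','o','o']
                · rfl
                · exact absurd ((PySem.Chars.startswith_iff _ _).mp hb) hp
              rw [if_neg (by rintro (h|h) <;> [exact m2 h; exact m3 h]), if_pos (Or.inr hsw)]
              simp
          · by_cases hcm : c = 'm'
            · subst hcm
              rw [show PySem.Dict.get? pvSylB 'm' = some ['m','a'] from by decide]
              change _ ↔ (if ['m','a'] = last ∨ PySem.Chars.startswith ('m'::rest) ['m','a'] = false then false else pvValid (List.drop 2 ('m'::rest)) ['m','a']) = true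
              by_cases hp : ['m','a'] <+: ('m'::rest)
              · have m2 : List.take 2 ('m'::rest) ∈ pvWordsA := (pvMem2 _).mpr (Or.inr hp)
                have ht : List.take 2 ('m'::rest) = ['m','a'] := by
                  rw [List.prefix_iff_eq_take] at hp; simpa using hp.symm
                have hsw : PySem.Chars.startswith ('m'::rest) ['m','a'] = true :=
                  (PySem.Chars.startswith_iff _ _).mpr hp
                rw [if_pos (Or.inl m2), if_pos m2, ht]
                by_cases hl : last = ['m','a']
                · rw [if_pos hl, if_pos (Or.inl hl.symm)]; simp
                · rw [if_neg hl, if_neg (by rw [hsw]; simp; exact fun e => hl e.symm)]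
                  exact ih _ ['m','a'] (by simp at hlen ⊢; omega)
              · have m2 : List.take 2 ('m'::rest) ∉ pvWordsA := by
                  rw [pvMem2]; rintro (h|h)
                  · simp [List.cons_prefix_iff] at h
                  · exact hp h
                have m3 : List.take 3 ('m'::rest) ∉ pvWordsA := by
                  rw [pvMem3 _ m2]; rintro (h|h) <;> simp [List.cons_prefix_iff] at h
                have hsw : PySem.Chars.startswith ('m'::rest) ['m','a'] = false := by
                  cases hb : PySem.Chars.startswith ('m'::rest) ['m','a']
                  · rfl
                  · exact absurd ((PySem.Chars.startswith_iff _ _).mp hb) hp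
                rw [if_neg (by rintro (h|h) <;> [exact m2 h; exact m3 h]), if_pos (Or.inr hsw)]
                simp
            · rw [pvSylB_get]
              simp only [if_neg hca, if_neg hcy, if_neg hcw, if_neg hcm]
              have m2 : List.take 2 (c::rest) ∉ pvWordsA := by
                rw [pvMem2]; rintro (h|h) <;>
                  (obtain ⟨t, ht, -⟩ := List.cons_prefix_iff.mp h; simp at ht; exact absurd ht.1 (by assumption))
              have m3 : List.take 3 (c::rest) ∉ pvWordsA := by
                rw [pvMem3 _ m2]; rintro (h|h) <;>
                  (obtain ⟨t, ht, -⟩ := List.cons_prefix_iff.mp h; simp at ht; exact absurd ht.1 (by assumption))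
              rw [if_neg (by rintro (h|h) <;> [exact m2 h; exact m3 h])]
              simp

theorem pvFold (bs : List String) (acc : Int) :
    bs.foldl (fun count w => if (pvLoopA w.toList []).length = 0 then count + 1 else count) acc
      = acc + (bs.map (fun w => if pvValid w.toList [] then (1 : Int) else 0)).sum := by
  induction bs generalizing acc with
  | nil => simp
  | cons w bs ih =>
    have hw := pvKey w.toList.length w.toList [] le_rfl
    simp only [List.foldl_cons, List.map_cons, List.sum_cons, ih]
    by_cases h : pvValid w.toList [] = true
    · rw [if_pos (by rw [List.length_eq_zero_iff]; exact hw.mpr h), if_pos h]; ring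
    · rw [if_neg (fun hl => h (hw.mp (List.length_eq_zero_iff.mp hl))), if_neg h]; ring

-- ===== VERDICT (by name: the statement is the Claim_ definition above) =====
theorem solution_spec : Claim_equal_solution := by
  intro babbling _
  show _ = _
  rw [solution, solution_alt, pvFold, zero_add]
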